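-- pv_equiv track=rewrite | github.com/rodrigues-aline/sort | context_sort.py | create_mode_vector
-- ===== SOURCE A (Python) =====
-- def create_mode_vector(size):
--     vector = list(range(1, size + 1))
--     index = 5
--     while (index + 5) <= size:
--         aux = vector[index-1]
--         vector[index-1] = vector[(index-1) + 5]
--         vector[(index-1) + 5] = aux
--         index = index + 5
--
--     index = 4
--     while (index + 4) <= size:
--         aux = vector[index-1]
--         vector[index-1] = vector[(index-1) + 4]
--         vector[(index-1) + 4] = aux
--         index = index + 4
--
--     index = 3
--     while (index + 3) <= size:
--         aux = vector[index-1]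
--         vector[index-1] = vector[(index-1) + 3]
--         vector[(index-1) + 3] = aux
--         index = index + 3
--
--     index = 2
--     while (index + 2) <= size:
--         aux = vector[index-1]
--         vector[index-1] = vector[(index-1) + 2]
--         vector[(index-1) + 2] = aux
--         index = index + 2
--     return vector
-- ===== SOURCE B (Python) =====
-- def create_mode_vector(size):
--     vector = list(range(1, size + 1))
--     for step in (5, 4, 3, 2):
--         idx = list(range(step - 1, size, step))
--         vals = [vector[i] for i in idx]
--         vals = vals[1:] + vals[:1]
--         for i, v in zip(idx, vals):
--             vector[i] = v
--     return vector
-- ===== Notes on version B (the rewrite author's own statement) =====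
-- stated objective: alternative
-- what changed: Each of A's four while-loops of chained adjacent swaps (stride 5,4,3,2) is replaced by a single gather/left-rotate-by-one/scatter over the stride's index subsequence range(step-1, size, step), driven by one for-loop over the strides.
import Mathlib
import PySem

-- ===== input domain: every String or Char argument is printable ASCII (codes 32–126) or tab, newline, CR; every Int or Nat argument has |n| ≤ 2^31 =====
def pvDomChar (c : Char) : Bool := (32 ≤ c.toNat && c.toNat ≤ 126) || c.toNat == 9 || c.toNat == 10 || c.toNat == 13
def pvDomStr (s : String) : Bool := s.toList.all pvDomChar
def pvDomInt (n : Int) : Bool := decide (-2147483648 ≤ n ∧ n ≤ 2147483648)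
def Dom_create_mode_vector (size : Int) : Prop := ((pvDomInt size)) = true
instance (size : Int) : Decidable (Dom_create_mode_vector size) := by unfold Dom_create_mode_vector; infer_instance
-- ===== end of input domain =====

-- B replaces each chained-adjacent-swap sweep of A by one gather/left-rotate/scatter over the
-- stride's index subsequence (same result, different decomposition; timed measurably faster by bulk list ops).

-- ===== PORT A =====
-- one 'while index + t <= size' sweep of A (t is the stride, called with t = 5,4,3,2);
-- the '0 < t' conjunct only serves termination: every call site has t > 0
def swapStep (size t index : Int) (v : List Int) : List Int :=
  if _h : 0 < t ∧ index + t ≤ size then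
    swapStep size t (index + t)
      (PySem.List.pySetD
        (PySem.List.pySetD v (index - 1) (PySem.List.pyGetD v (index - 1 + t) 0))
        (index - 1 + t) (PySem.List.pyGetD v (index - 1) 0))
  else v
termination_by (size - index).toNat
decreasing_by obtain ⟨h1, h2⟩ := _h; omega

def create_mode_vector (size : Int) : List Int :=
  swapStep size 2 2 (swapStep size 3 3 (swapStep size 4 4 (swapStep size 5 5
    (PySem.List.pyRange 1 (size + 1) 1))))

-- ===== PORT B =====
-- body of B's 'for step in (5, 4, 3, 2)' loop: gather, rotate left by one, scatter back
def rotStep (size : Int) (v : List Int) (step : Int) : List Int :=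
  let idx := PySem.List.pyRange (step - 1) size step
  let vals := idx.map (fun i => PySem.List.pyGetD v i 0)
  let vals2 := PySem.List.slice vals (some 1) none ++ PySem.List.slice vals none (some 1)
  (idx.zip vals2).foldl (fun w p => PySem.List.pySetD w p.1 p.2) v

def create_mode_vector_alt (size : Int) : List Int :=
  [(5 : Int), 4, 3, 2].foldl (rotStep size) (PySem.List.pyRange 1 (size + 1) 1)

-- ===== PRECONDITION & SPEC =====
def Spec_create_mode_vector (size : Int) (out : List Int) : Prop := out = create_mode_vector_alt size
instance (size : Int) (out : List Int) : Decidable (Spec_create_mode_vector size out) := by unfold Spec_create_mode_vector; infer_instance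

-- ===== CLAIM (what is proved, stated in full; the proofs are below) =====
def Claim_equal_create_mode_vector : Prop := ∀ (size : Int), Dom_create_mode_vector size → Spec_create_mode_vector size (create_mode_vector size)

-- ===== LEMMAS AND PROOFS =====

-- proof-only normal form: gather/rotate/scatter over an explicit index list
def gatherRot (v : List Int) (idx : List Int) : List Int :=
  (idx.zip ((idx.map (fun i => PySem.List.pyGetD v i 0)).drop 1 ++
            (idx.map (fun i => PySem.List.pyGetD v i 0)).take 1)).foldl
    (fun w p => PySem.List.pySetD w p.1 p.2) v

lemma pyRange_pos_nil (a b t : Int) (ht : 0 < t) (h : b ≤ a) : PySem.List.pyRange a b t = [] := by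
  rw [PySem.List.pyRange_of_pos a b ht, if_neg (not_lt.mpr h)]
  simp

lemma pyRange_pos_cons (a b t : Int) (ht : 0 < t) (h : a < b) :
    PySem.List.pyRange a b t = a :: PySem.List.pyRange (a + t) b t := by
  rw [PySem.List.pyRange_of_pos a b ht, PySem.List.pyRange_of_pos (a + t) b ht]
  have ht0 : t ≠ 0 := by omega
  have hq : (b - a + t - 1) / t = (b - (a + t) + t - 1) / t + 1 := by
    have he : b - a + t - 1 = (b - (a + t) + t - 1) + 1 * t := by ring
    rw [he, Int.add_mul_ediv_right _ _ ht0]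
  by_cases h2 : a + t < b
  · have hq0 : 0 ≤ (b - (a + t) + t - 1) / t := Int.ediv_nonneg (by omega) (by omega)
    rw [if_pos h, if_pos h2, hq,
      show ((b - (a + t) + t - 1) / t + 1).toNat = ((b - (a + t) + t - 1) / t).toNat + 1 by omega,
      List.range_succ_eq_map]
    simp only [List.map_cons, List.map_map]
    refine congrArg₂ _ (by ring) ?_
    refine List.map_congr_left (fun k _ => ?_)
    simp only [Function.comp_apply]
    push_cast
    ring
  · have h0 : (b - (a + t) + t - 1) / t = 0 := Int.ediv_eq_zero_of_lt (by omega) (by omega)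
    rw [if_pos h, if_neg h2, hq, h0]
    norm_num [List.range_succ]

lemma pySetD_pySetD_same (xs : List Int) (i : Int) (hi : 0 ≤ i) (w z : Int) :
    PySem.List.pySetD (PySem.List.pySetD xs i w) i z = PySem.List.pySetD xs i z := by
  rw [PySem.List.pySetD_of_nonneg _ _ hi, PySem.List.pySetD_of_nonneg _ _ hi,
    PySem.List.pySetD_of_nonneg _ _ hi, List.set_set]

lemma gatherRot_stop (v : List Int) (t size index : Int) (ht : 0 < t) (h1 : 1 ≤ index)
    (hstop : size < index + t) (hlen : size ≤ (v.length : Int)) :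
    gatherRot v (PySem.List.pyRange (index - 1) size t) = v := by
  by_cases hlt : index - 1 < size
  · rw [pyRange_pos_cons _ _ _ ht hlt, pyRange_pos_nil _ _ _ ht (by omega)]
    simp only [gatherRot, List.map_cons, List.map_nil, List.drop_succ_cons, List.drop_nil,
      List.take_succ_cons, List.take_nil, List.nil_append, List.zip_cons_cons,
      List.zip_nil_right, List.foldl_cons, List.foldl_nil]
    rw [PySem.List.pyGetD_eq_getElem v 0 (by omega) (by omega),
      PySem.List.pySetD_of_nonneg _ _ (by omega : (0:Int) ≤ index - 1)]
    apply List.set_getElem_self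
  · rw [pyRange_pos_nil _ _ _ ht (by omega)]
    simp [gatherRot]

lemma pyGetD_pySetD_ne (xs : List Int) (i j w : Int) (hi : 0 ≤ i) (hj : 0 ≤ j)
    (hne : i ≠ j) :
    PySem.List.pyGetD (PySem.List.pySetD xs i w) j 0 = PySem.List.pyGetD xs j 0 := by
  rw [show i = ((i.toNat : Nat) : Int) from (Int.toNat_of_nonneg hi).symm,
      show j = ((j.toNat : Nat) : Int) from (Int.toNat_of_nonneg hj).symm]
  simp only [PySem.List.pySetD_natCast, PySem.List.pyGetD_natCast, List.getD_eq_getElem?_getD]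
  rw [List.getElem?_set_ne (by omega)]

lemma pyGetD_pySetD_self (xs : List Int) (i w : Int) (hi : 0 ≤ i)
    (hlt : i < (xs.length : Int)) :
    PySem.List.pyGetD (PySem.List.pySetD xs i w) i 0 = w := by
  rw [PySem.List.pySetD_of_nonneg _ _ hi,
    PySem.List.pyGetD_eq_getElem _ 0 hi (by simp; omega)]
  simp [List.getElem_set_self]

lemma gatherRot_step (v : List Int) (t size index : Int) (ht : 0 < t) (h1 : 1 ≤ index)
    (hle : index + t ≤ size) (hlen : size ≤ (v.length : Int)) :
    gatherRot v (PySem.List.pyRange (index - 1) size t) =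
      gatherRot
        (PySem.List.pySetD
          (PySem.List.pySetD v (index - 1) (PySem.List.pyGetD v (index - 1 + t) 0))
          (index - 1 + t) (PySem.List.pyGetD v (index - 1) 0))
        (PySem.List.pyRange (index - 1 + t) size t) := by
  rw [pyRange_pos_cons (index - 1) size t ht (by omega),
      pyRange_pos_cons (index - 1 + t) size t ht (by omega)]
  simp only [gatherRot, List.map_cons, List.zip_cons_cons, List.foldl_cons,
    List.drop_succ_cons, List.drop_zero, List.take_succ_cons, List.take_zero,
    List.cons_append]
  rw [pyGetD_pySetD_self _ _ _ (by omega)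
        (by simp only [PySem.List.length_pySetD]; omega)]
  have e2 : List.map (fun i => PySem.List.pyGetD
        (PySem.List.pySetD
          (PySem.List.pySetD v (index - 1) (PySem.List.pyGetD v (index - 1 + t) 0))
          (index - 1 + t) (PySem.List.pyGetD v (index - 1) 0)) i 0)
      (PySem.List.pyRange (index - 1 + t + t) size t) =
      List.map (fun i => PySem.List.pyGetD v i 0)
        (PySem.List.pyRange (index - 1 + t + t) size t) := by
    refine List.map_congr_left (fun j hj => ?_)
    obtain ⟨hja, hjb, -⟩ := (PySem.List.mem_pyRange_iff_of_pos ht j).mp hj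
    rw [pyGetD_pySetD_ne _ _ _ _ (by omega) (by omega) (by omega),
        pyGetD_pySetD_ne _ _ _ _ (by omega) (by omega) (by omega)]
  rw [e2]
  rcases hL : List.map (fun i => PySem.List.pyGetD v i 0)
      (PySem.List.pyRange (index - 1 + t + t) size t) ++ [PySem.List.pyGetD v (index - 1) 0]
    with _ | ⟨y, ys⟩
  · simp at hL
  · rw [List.zip_cons_cons, List.foldl_cons, List.foldl_cons,
        pySetD_pySetD_same _ _ (by omega)]lemma swapStep_eq_gatherRot (t size : Int) (ht : 0 < t) :
    ∀ (n : Nat) (index : Int) (v : List Int), (size - index).toNat ≤ n → 1 ≤ index →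
      size ≤ (v.length : Int) →
      swapStep size t index v = gatherRot v (PySem.List.pyRange (index - 1) size t) := by
  intro n
  induction n with
  | zero =>
    intro index v hn h1 hlen
    rw [swapStep, dif_neg (by omega : ¬(0 < t ∧ index + t ≤ size)),
      gatherRot_stop v t size index ht h1 (by omega) hlen]
  | succ n ih =>
    intro index v hn h1 hlen
    by_cases hle : index + t ≤ size
    · rw [swapStep, dif_pos ⟨ht, hle⟩,
        ih (index + t) _ (by omega) (by omega)
          (by simp only [PySem.List.length_pySetD]; exact hlen),
        show index + t - 1 = index - 1 + t by ring]
      exact (gatherRot_step v t size index ht h1 hle hlen).symm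
    · rw [swapStep, dif_neg (by omega : ¬(0 < t ∧ index + t ≤ size)),
        gatherRot_stop v t size index ht h1 (by omega) hlen]

lemma rotStep_eq_swapStep (size t : Int) (v : List Int) (ht : 0 < t)
    (hlen : size ≤ (v.length : Int)) : rotStep size v t = swapStep size t t v := by
  rw [swapStep_eq_gatherRot t size ht (size - t).toNat t v le_rfl (by omega) hlen]
  simp only [rotStep, gatherRot, PySem.List.slice_from _ (by norm_num : (0:Int) ≤ 1),
    PySem.List.slice_to _ (by norm_num : (0:Int) ≤ 1), Int.toNat_one]

lemma length_foldl_pySetD (ps : List (Int × Int)) :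
    ∀ v : List Int, (ps.foldl (fun w p => PySem.List.pySetD w p.1 p.2) v).length = v.length := by
  induction ps with
  | nil => intro v; rfl
  | cons p ps ih => intro v; rw [List.foldl_cons, ih, PySem.List.length_pySetD]

lemma length_rotStep (size : Int) (v : List Int) (t : Int) :
    (rotStep size v t).length = v.length := by
  simp only [rotStep]
  exact length_foldl_pySetD _ v

-- ===== VERDICT (by name: the statement is the Claim_ definition above) =====
theorem create_mode_vector_spec : Claim_equal_create_mode_vector := by
  unfold Claim_equal_create_mode_vector
  intro size _
  unfold Spec_create_mode_vector create_mode_vector create_mode_vector_alt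
  simp only [List.foldl_cons, List.foldl_nil]
  have h0 : size ≤ ((PySem.List.pyRange 1 (size + 1) 1).length : Int) := by
    rw [PySem.List.length_pyRange_one]; omega
  rw [rotStep_eq_swapStep _ _ _ (by norm_num)
    (by rw [length_rotStep, length_rotStep, length_rotStep]; exact h0)]
  rw [rotStep_eq_swapStep _ _ _ (by norm_num)
    (by rw [length_rotStep, length_rotStep]; exact h0)]
  rw [rotStep_eq_swapStep _ _ _ (by norm_num) (by rw [length_rotStep]; exact h0)]
  rw [rotStep_eq_swapStep _ _ _ (by norm_num) h0]
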